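-- pv_equiv track=rewrite | github.com/10thSSAFY/SSAFY_TIL | 20230809/problem_4873.py | del_double
-- ===== SOURCE A (Python) =====
-- def del_double(s):
--     stack = []
--     for char in s:
--         if stack and stack[-1] == char:
--             stack.pop()
--         else:
--             stack.append(char)
--     return len(stack)
-- ===== SOURCE B (Python) =====
-- def del_double(s):
--     t = list(s)
--     while True:
--         for i in range(len(t) - 1):
--             if t[i] == t[i + 1]:
--                 del t[i:i + 2]
--                 break
--         else:
--             return len(t)
-- ===== Notes on version B (the rewrite author's own statement) =====
-- stated objective: alternative
-- what changed: Replaces the one-pass stack reduction by repeatedly scanning for the first adjacent equal pair and deleting it until the string stabilizes, then returning its length; confluence of pair removal gives the same result.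
import Mathlib
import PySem

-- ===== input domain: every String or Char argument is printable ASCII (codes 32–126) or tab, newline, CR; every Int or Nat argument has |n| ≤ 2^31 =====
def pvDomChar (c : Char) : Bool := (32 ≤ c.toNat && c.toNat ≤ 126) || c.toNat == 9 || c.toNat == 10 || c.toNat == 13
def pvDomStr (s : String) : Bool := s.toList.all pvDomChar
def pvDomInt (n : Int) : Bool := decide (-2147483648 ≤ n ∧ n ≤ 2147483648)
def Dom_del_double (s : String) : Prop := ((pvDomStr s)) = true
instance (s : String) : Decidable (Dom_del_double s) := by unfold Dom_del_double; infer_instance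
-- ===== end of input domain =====

-- B replaces A's one-pass stack by repeated deletion of the first adjacent equal pair
-- until none remains (alternative decomposition; not faster).

-- ===== PORT A =====
-- one step of A's loop body: pop if top equals char, else push (stack top at head)
def pvStep (stack : List Char) (c : Char) : List Char :=
  match stack with
  | [] => [c]
  | h :: t => if h = c then t else c :: h :: t

def del_double (s : String) : Int :=
  ((s.toList.foldl pvStep []).length : Int)

-- ===== PORT B =====
-- delete the first adjacent equal pair, if any (the inner for-loop of Source B)
def pvRemFirst : List Char → Option (List Char)
  | a :: b :: rest =>
      if a = b then some rest else (pvRemFirst (b :: rest)).map (a :: ·)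
  | _ => none

theorem pvRemFirst_length : ∀ t t', pvRemFirst t = some t' → t'.length < t.length
  | a :: b :: rest, t', h => by
      by_cases hab : a = b
      · simp [pvRemFirst, hab] at h; subst h; simp only [List.length_cons]; omega
      · simp [pvRemFirst, hab] at h
        obtain ⟨w, hw, hw'⟩ := h
        have := pvRemFirst_length (b :: rest) w hw
        subst hw'; simp at this ⊢; omega
  | [], t', h => by simp [pvRemFirst] at h
  | [a], t', h => by simp [pvRemFirst] at h

-- the outer while-loop of Source B
def pvReduce (t : List Char) : List Char :=
  match h : pvRemFirst t with
  | some t' => pvReduce t'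
  | none => t
termination_by t.length
decreasing_by exact pvRemFirst_length _ _ h

def del_double_alt (s : String) : Int :=
  ((pvReduce s.toList).length : Int)

-- ===== PRECONDITION & SPEC =====
def Spec_del_double (s : String) (out : Int) : Prop := out = del_double_alt s
instance (s : String) (out : Int) : Decidable (Spec_del_double s out) := by unfold Spec_del_double; infer_instance

-- ===== CLAIM (what is proved, stated in full; the proofs are below) =====
def Claim_equal_del_double : Prop := ∀ (s : String), Dom_del_double s → Spec_del_double s (del_double s)

-- ===== LEMMAS AND PROOFS =====

-- no two adjacent equal elements
def pvNoAdj : List Char → Prop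
  | a :: b :: r => a ≠ b ∧ pvNoAdj (b :: r)
  | _ => True

-- the stack never holds two equal adjacent elements
theorem pvStep_noAdj (st : List Char) (c : Char) (h : pvNoAdj st) :
    pvNoAdj (pvStep st c) := by
  match st with
  | [] => simp [pvStep, pvNoAdj]
  | [a] =>
    by_cases he : a = c <;> simp [pvStep, he, pvNoAdj]
    exact fun h' => he h'.symm
  | a :: b :: t =>
    simp only [pvStep]
    split_ifs with he
    · exact h.2
    · exact ⟨fun h' => he h'.symm, h⟩

-- processing two equal chars from a pair-free state is the identity
theorem pvStep_twice (st : List Char) (c : Char) (h : pvNoAdj st) :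
    pvStep (pvStep st c) c = st := by
  match st with
  | [] => simp [pvStep]
  | [a] =>
    by_cases he : a = c <;> simp [pvStep, he]
  | a :: b :: t =>
    have hne : a ≠ b := h.1
    by_cases he : a = c
    · subst he
      have : b ≠ a := Ne.symm hne
      simp [pvStep, this]
    · simp [pvStep, he]

theorem pvFoldl_removePair (u : List Char) (c : Char) (v : List Char) (st : List Char)
    (h : pvNoAdj st) :
    List.foldl pvStep st (u ++ c :: c :: v) = List.foldl pvStep st (u ++ v) := by
  induction u generalizing st with
  | nil =>
      simp only [List.nil_append, List.foldl_cons]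
      rw [pvStep_twice st c h]
  | cons a u ih =>
      simp only [List.cons_append, List.foldl_cons]
      exact ih _ (pvStep_noAdj st a h)

theorem pvRemFirst_some (t t' : List Char) (h : pvRemFirst t = some t') :
    ∃ u c v, t = u ++ c :: c :: v ∧ t' = u ++ v := by
  match t with
  | [] => simp [pvRemFirst] at h
  | [a] => simp [pvRemFirst] at h
  | a :: b :: rest =>
    by_cases hab : a = b
    · subst hab
      simp [pvRemFirst] at h
      exact ⟨[], a, rest, by simp, by simp [← h]⟩
    · simp [pvRemFirst, hab] at h
      obtain ⟨w, hw, hw'⟩ := h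
      obtain ⟨u, c, v, h1, h2⟩ := pvRemFirst_some (b :: rest) w hw
      exact ⟨a :: u, c, v, by simp [h1], by simp [← hw', h2]⟩

theorem pvRemFirst_none (t : List Char) (h : pvRemFirst t = none) :
    pvNoAdj t := by
  match t with
  | [] => trivial
  | [a] => trivial
  | a :: b :: rest =>
    by_cases hab : a = b
    · simp [pvRemFirst, hab] at h
    · simp only [pvRemFirst, if_neg hab, Option.map_eq_none_iff] at h
      exact ⟨hab, pvRemFirst_none (b :: rest) h⟩

-- on a pair-free list the stack just reverses it
theorem pvFoldl_noPair (l : List Char) (st : List Char)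
    (hl : pvNoAdj l)
    (hhd : ∀ a c t t', st = a :: t → l = c :: t' → a ≠ c) :
    List.foldl pvStep st l = l.reverse ++ st := by
  induction l generalizing st with
  | nil => simp
  | cons c l ih =>
      have hstep : pvStep st c = c :: st := by
        match st with
        | [] => simp [pvStep]
        | a :: t =>
          have : a ≠ c := hhd a c t l rfl rfl
          simp [pvStep, this]
      simp only [List.foldl_cons, hstep]
      have hl' : pvNoAdj l := by
        match l with
        | [] => trivial
        | b :: r => exact hl.2
      rw [ih (c :: st) hl' ?_]
      · simp
      · intro a c' t t' ha hc'
        cases ha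
        cases hc'
        exact (hl.1 : c ≠ c')

theorem pvFoldl_reduce_inv (t : List Char) :
    List.foldl pvStep [] t = List.foldl pvStep [] (pvReduce t) := by
  rw [pvReduce]
  split
  · next t' h =>
    obtain ⟨u, c, v, h1, h2⟩ := pvRemFirst_some t t' h
    have := pvFoldl_removePair u c v [] trivial
    rw [h1, this, ← h2]
    exact pvFoldl_reduce_inv t'
  · rfl
termination_by t.length
decreasing_by exact pvRemFirst_length _ _ ‹_›

theorem pvReduce_noPair (t : List Char) : pvRemFirst (pvReduce t) = none := by
  rw [pvReduce]
  split
  · next t' h => exact pvReduce_noPair t'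
  · next h => exact h
termination_by t.length
decreasing_by exact pvRemFirst_length _ _ ‹_›

theorem pvKey (t : List Char) :
    (List.foldl pvStep [] t).length = (pvReduce t).length := by
  rw [pvFoldl_reduce_inv t]
  have hna := pvRemFirst_none _ (pvReduce_noPair t)
  rw [pvFoldl_noPair _ [] hna (by intro a c t1 t2 ha _; simp at ha)]
  simp

-- ===== VERDICT (by name: the statement is the Claim_ definition above) =====
theorem del_double_spec : Claim_equal_del_double := by
  intro s _
  unfold Spec_del_double del_double del_double_alt
  exact congrArg Int.ofNat (pvKey s.toList)
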